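-- pv_equiv track=rewrite | github.com/fcjbispo/fbpyutils | fbpyutils/google/drive.py | _build_query_expression
-- ===== SOURCE A (Python) =====
-- from typing import Tuple, Dict, List
--
-- def _build_query_expression(
--     file_extensions: List[str] = None,
--     mime_types: List[str] = None,
--     prefixes: List[str] = None,
--     exclude_file_extensions: bool = False,
--     exclude_mime_types: bool = False,
--     exclude_prefixes: bool = False,
--     trashed: bool = False
-- ) -> str:
--     '''
--         Builds a query string to filter/search Google Drive objects. The criterias used are cummulative
--         representing information to be returned in the object list and may be reversed using the exclude
--         flags options.
--
--         file_extensions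
--             List of file extensions to be searched/filtered
--
--         mime_types
--             List of mime types to searched/filtered
--
--         prefixes
--             List of object names prefixes
--
--         exclude_file_extensions
--             Flag to reverse/exclude the file extensions on object list result
--
--         exclude_mime_types
--             Flag to reverse/exclude the mime types on object list result
--
--         exclude_prefixes
--             Flag to reverse/exclude the object name prefixes on object list result
--
--         trashed
--             Flag to include objects in the Google Drive Trash can
--
--         Returns a query string with the criterias to filter/search objects in Google Drive
--     '''
--     file_extensions = file_extensions or []
--     mime_types = mime_types or []
--     prefixes = prefixes or []
--     def expand(w, x, y, z):
--         return ("not " if y else "") + w + (" contains " if z else "=") + "'" \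
--             + x + "'"
--
--     def expand_expression(
--         element, element_list, reverse=False, contains=False
--     ):
--         fe = ""
--         connector = " and " if reverse else " or "
--         if len(element_list) > 0:
--             if len(element_list) > 1:
--                 fe = expand(element, element_list[0], reverse, contains) + \
--                     connector + connector.join(
--                     [expand(element, e, reverse, contains)
--                         for e in element_list[1:]])
--             else:
--                 fe = expand(element, element_list[0], reverse, contains)
--
--         return fe
--
--     join_list = []
--     exp = expand_expression(
--         'fileExtension', file_extensions, exclude_file_extensions)
--     if exp:
--         join_list.append(exp)
--
--     exp = expand_expression('mimeType', mime_types, exclude_mime_types)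
--     if exp:
--         join_list.append(exp)
--
--     exp = expand_expression('name', prefixes, exclude_prefixes, contains=True)
--     if exp:
--         join_list.append(exp)
--
--     join_list.append(
--         ("not " if not trashed else "") + "trashed"
--     )
--
--     return " and ".join(join_list)
-- ===== SOURCE B (Python) =====
-- def _build_query_expression(
--     file_extensions=None,
--     mime_types=None,
--     prefixes=None,
--     exclude_file_extensions=False,
--     exclude_mime_types=False,
--     exclude_prefixes=False,
--     trashed=False,
-- ):
--     # Different strategy: instead of joining each criterion group into a string
--     # and then joining the groups, flatten everything (including the trashed
--     # flag) into ONE stream of (group-id, group-connector, clause) triples and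
--     # emit the final string in a single left-to-right pass, choosing each
--     # separator by comparing the adjacent clauses' group ids: same group ->
--     # that group's connector, new group -> ' and '.
--     clauses = []
--     for gid, (field, values, reverse, contains) in enumerate([
--             ('fileExtension', file_extensions, exclude_file_extensions, False),
--             ('mimeType', mime_types, exclude_mime_types, False),
--             ('name', prefixes, exclude_prefixes, True)]):
--         sep = ' and ' if reverse else ' or '
--         for v in (values or []):
--             clauses.append((gid, sep,
--                 ('not ' if reverse else '') + field
--                 + (' contains ' if contains else '=') + "'" + v + "'"))
--     clauses.append((3, ' and ', ('' if trashed else 'not ') + 'trashed'))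
--     out = clauses[0][2]
--     prev = clauses[0][0]
--     for gid, sep, text in clauses[1:]:
--         out += (sep if gid == prev else ' and ') + text
--         prev = gid
--     return out
-- ===== Notes on version B (the rewrite author's own statement) =====
-- stated objective: alternative
-- what changed: Instead of A's per-group join of clause strings followed by a join of the groups, B flattens all criteria (and the trashed flag) into one stream of (group-id, connector, clause) triples and emits the whole query in a single stateful pass, picking each separator by comparing adjacent group ids.
import Mathlib
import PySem

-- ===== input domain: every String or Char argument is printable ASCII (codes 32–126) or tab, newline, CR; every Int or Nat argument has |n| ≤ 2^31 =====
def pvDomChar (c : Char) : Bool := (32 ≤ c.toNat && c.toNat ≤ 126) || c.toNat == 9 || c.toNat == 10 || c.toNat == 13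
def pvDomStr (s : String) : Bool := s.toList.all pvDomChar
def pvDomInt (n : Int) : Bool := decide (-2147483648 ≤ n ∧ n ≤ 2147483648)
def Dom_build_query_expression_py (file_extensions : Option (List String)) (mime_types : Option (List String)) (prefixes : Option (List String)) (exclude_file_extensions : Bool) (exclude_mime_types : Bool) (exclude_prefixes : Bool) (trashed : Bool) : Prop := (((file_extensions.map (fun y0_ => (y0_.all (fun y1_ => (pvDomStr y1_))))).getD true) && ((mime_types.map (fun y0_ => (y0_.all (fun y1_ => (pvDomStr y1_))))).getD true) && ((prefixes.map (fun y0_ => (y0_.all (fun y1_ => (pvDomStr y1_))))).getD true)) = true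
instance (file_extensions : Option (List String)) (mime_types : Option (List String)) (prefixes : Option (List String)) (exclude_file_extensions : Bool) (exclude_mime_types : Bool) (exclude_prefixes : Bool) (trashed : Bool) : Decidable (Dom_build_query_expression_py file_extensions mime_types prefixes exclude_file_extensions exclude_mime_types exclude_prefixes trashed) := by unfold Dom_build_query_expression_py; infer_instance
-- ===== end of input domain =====

-- B replaces A's join-per-group-then-join-the-groups construction by one flat
-- stream of (group-id, connector, clause) triples emitted in a single stateful
-- left-to-right pass choosing each separator from adjacent group ids (objective: alternative).


-- ===== PORT A =====
-- def expand(w, x, y, z)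
def pvExpandA (w x : String) (y z : Bool) : String :=
  (if y then "not " else "") ++ w ++ (if z then " contains " else "=") ++ "'" ++ x ++ "'"

-- def expand_expression(element, element_list, reverse=False, contains=False)
-- element_list[0] is written headD "" — the access is guarded by len(element_list) > 0, so it is exact.
def pvExpandExpressionA (element : String) (element_list : List String) (reverse : Bool) (contains : Bool) : String :=
  let connector := if reverse then " and " else " or "
  if element_list.length > 0 then
    if element_list.length > 1 then
      pvExpandA element (element_list.headD "") reverse contains ++ connector ++
        PySem.Str.join connector
          ((element_list.drop 1).map (fun e => pvExpandA element e reverse contains))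
    else
      pvExpandA element (element_list.headD "") reverse contains
  else ""

def build_query_expression_py (file_extensions : Option (List String)) (mime_types : Option (List String)) (prefixes : Option (List String)) (exclude_file_extensions : Bool) (exclude_mime_types : Bool) (exclude_prefixes : Bool) (trashed : Bool) : String :=
  let file_extensions := file_extensions.getD []   -- file_extensions or []
  let mime_types := mime_types.getD []
  let prefixes := prefixes.getD []
  let join_list : List String := []
  let exp := pvExpandExpressionA "fileExtension" file_extensions exclude_file_extensions false
  let join_list := if exp ≠ "" then join_list ++ [exp] else join_list
  let exp := pvExpandExpressionA "mimeType" mime_types exclude_mime_types false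
  let join_list := if exp ≠ "" then join_list ++ [exp] else join_list
  let exp := pvExpandExpressionA "name" prefixes exclude_prefixes true
  let join_list := if exp ≠ "" then join_list ++ [exp] else join_list
  let join_list := join_list ++ [(if !trashed then "not " else "") ++ "trashed"]
  PySem.Str.join " and " join_list

-- ===== PORT B =====
-- one clause: ('not ' if reverse else '') + field + (' contains ' if contains else '=') + "'" + v + "'"
def pvClauseB (field : String) (reverse contains : Bool) (v : String) : String :=
  (if reverse then "not " else "") ++ field ++ (if contains then " contains " else "=") ++ "'" ++ v ++ "'"

-- body of B's emission loop: out += (sep if gid == prev else ' and ') + text; prev = gid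
def pvStepB (st : String × Int) (x : Int × String × String) : String × Int :=
  (st.1 ++ (if x.1 == st.2 then x.2.1 else " and ") ++ x.2.2, x.1)

-- out = clauses[0][2]; prev = clauses[0][0]; loop over clauses[1:]
-- (the [] branch is unreachable: B always appends the trashed triple first)
def pvEmitB (clauses : List (Int × String × String)) : String :=
  match clauses with
  | [] => ""
  | c :: rest => (rest.foldl pvStepB (c.2.2, c.1)).1

def build_query_expression_py_alt (file_extensions : Option (List String)) (mime_types : Option (List String)) (prefixes : Option (List String)) (exclude_file_extensions : Bool) (exclude_mime_types : Bool) (exclude_prefixes : Bool) (trashed : Bool) : String :=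
  let specs : List (String × Option (List String) × Bool × Bool) :=
    [("fileExtension", file_extensions, exclude_file_extensions, false),
     ("mimeType", mime_types, exclude_mime_types, false),
     ("name", prefixes, exclude_prefixes, true)]
  let clauses := (PySem.List.enumerate specs).foldl (fun acc x =>
    match x with
    | (gid, field, values, reverse, contains) =>
      acc ++ (values.getD []).map (fun v =>
        (gid, (if reverse then " and " else " or "), pvClauseB field reverse contains v)))
    ([] : List (Int × String × String))
  let clauses := clauses ++ [((3 : Int), " and ", (if trashed then "" else "not ") ++ "trashed")]
  pvEmitB clauses

-- ===== PRECONDITION & SPEC =====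
def Spec_build_query_expression_py (file_extensions : Option (List String)) (mime_types : Option (List String)) (prefixes : Option (List String)) (exclude_file_extensions : Bool) (exclude_mime_types : Bool) (exclude_prefixes : Bool) (trashed : Bool) (out : String) : Prop := out = build_query_expression_py_alt file_extensions mime_types prefixes exclude_file_extensions exclude_mime_types exclude_prefixes trashed
instance (file_extensions : Option (List String)) (mime_types : Option (List String)) (prefixes : Option (List String)) (exclude_file_extensions : Bool) (exclude_mime_types : Bool) (exclude_prefixes : Bool) (trashed : Bool) (out : String) : Decidable (Spec_build_query_expression_py file_extensions mime_types prefixes exclude_file_extensions exclude_mime_types exclude_prefixes trashed out) := by unfold Spec_build_query_expression_py; infer_instance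

-- ===== CLAIM =====
def Claim_equal_build_query_expression_py : Prop := ∀ (file_extensions : Option (List String)) (mime_types : Option (List String)) (prefixes : Option (List String)) (exclude_file_extensions : Bool) (exclude_mime_types : Bool) (exclude_prefixes : Bool) (trashed : Bool), Dom_build_query_expression_py file_extensions mime_types prefixes exclude_file_extensions exclude_mime_types exclude_prefixes trashed → Spec_build_query_expression_py file_extensions mime_types prefixes exclude_file_extensions exclude_mime_types exclude_prefixes trashed (build_query_expression_py file_extensions mime_types prefixes exclude_file_extensions exclude_mime_types exclude_prefixes trashed)

-- ===== LEMMAS AND PROOFS =====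

theorem strJoin_singleton (sep p : String) : PySem.Str.join sep [p] = p := by
  apply String.toList_inj.mp
  simp [PySem.Str.toList_join, PySem.Chars.join_singleton]

theorem strJoin_cons_cons (sep p q : String) (rest : List String) :
    PySem.Str.join sep (p :: q :: rest) = p ++ sep ++ PySem.Str.join sep (q :: rest) := by
  apply String.toList_inj.mp
  simp [PySem.Str.toList_join, PySem.Chars.join_cons_cons, String.toList_append]

theorem expandA_ne (w x : String) (y z : Bool) : pvExpandA w x y z ≠ "" := by
  intro h
  have h' := congrArg String.toList h
  simp [pvExpandA, String.toList_append] at h'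

theorem clauseB_eq (f : String) (r c : Bool) (v : String) :
    pvClauseB f r c v = pvExpandA f v r c := rfl

theorem expandExpr_eq_join (el : String) (l : List String) (rev cont : Bool) (h : l ≠ []) :
    pvExpandExpressionA el l rev cont
      = PySem.Str.join (if rev then " and " else " or ")
          (l.map (pvClauseB el rev cont)) := by
  match l with
  | [] => exact absurd rfl h
  | [a] =>
      simp [pvExpandExpressionA, clauseB_eq, strJoin_singleton]
  | a :: b :: t =>
      simp only [pvExpandExpressionA, List.length_cons, List.headD, List.drop, List.map,
        strJoin_cons_cons, clauseB_eq]
      split_ifs with h1 h2 <;> first | rfl | omega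

theorem expandExpr_ne (el : String) (l : List String) (rev cont : Bool) (h : l ≠ []) :
    pvExpandExpressionA el l rev cont ≠ "" := by
  rw [expandExpr_eq_join el l rev cont h]
  match l with
  | [] => exact absurd rfl h
  | a :: t =>
      intro hc
      have hne := expandA_ne el a rev cont
      rcases t with _ | ⟨b, t⟩
      · rw [List.map_cons, List.map_nil, strJoin_singleton, clauseB_eq] at hc
        exact hne hc
      · rw [List.map_cons, List.map_cons, strJoin_cons_cons, clauseB_eq] at hc
        have h2 := congrArg String.toList hc
        simp [String.toList_append] at h2
        exact hne (String.toList_inj.mp (by simp [h2.1]))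

-- A's conditional append rewritten with the group's whole join
theorem step_eq (acc : List String) (el : String) (l : List String) (rev cont : Bool) :
    (if pvExpandExpressionA el l rev cont ≠ "" then acc ++ [pvExpandExpressionA el l rev cont] else acc)
      = (if l.isEmpty then acc
         else acc ++ [PySem.Str.join (if rev then " and " else " or ")
                        (l.map (pvClauseB el rev cont))]) := by
  by_cases h : l = []
  · subst h; simp [pvExpandExpressionA]
  · have h1 := expandExpr_ne el l rev cont h
    rw [if_pos h1, if_neg (by simp [h] : ¬ l.isEmpty = true),
        expandExpr_eq_join el l rev cont h]

-- "tail" of a separated join: glue sep [x1,…,xk] = sep ++ x1 ++ … ++ sep ++ xk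
def pvGlue (sep : String) (l : List String) : String :=
  l.foldr (fun x r => sep ++ x ++ r) ""

theorem str_append_empty (s : String) : s ++ "" = s := by
  apply String.toList_inj.mp; simp [String.toList_append]

theorem join_eq_glue (sep x : String) (xs : List String) :
    PySem.Str.join sep (x :: xs) = x ++ pvGlue sep xs := by
  induction xs generalizing x with
  | nil => simp [strJoin_singleton, pvGlue, str_append_empty]
  | cons b t ih =>
      rw [strJoin_cons_cons, ih b]
      simp [pvGlue, String.append_assoc]

-- folding clauses that all carry the current gid appends glue sep texts
theorem foldSame (g : Int) (sep : String) (ts : List String) (out : String) :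
    List.foldl pvStepB (out, g) (ts.map (fun x => (g, sep, x)))
      = (out ++ pvGlue sep ts, g) := by
  induction ts generalizing out with
  | nil => simp [pvGlue, str_append_empty]
  | cons a t ih =>
      simp only [List.map_cons, List.foldl_cons, pvStepB, beq_self_eq_true, if_pos]
      rw [ih]
      simp [pvGlue, String.append_assoc]

-- entering a new group: ' and ' then the group's whole join
theorem foldGroup (g p : Int) (hgp : g ≠ p) (sep : String) (a : String) (t : List String) (out : String) :
    List.foldl pvStepB (out, p) ((a :: t).map (fun x => (g, sep, x)))
      = (out ++ " and " ++ PySem.Str.join sep (a :: t), g) := by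
  simp only [List.map_cons, List.foldl_cons, pvStepB]
  rw [if_neg (by simpa using hgp), foldSame, join_eq_glue]
  simp [String.append_assoc]

-- flattening a list of groups (all non-empty, fresh gids) folds to glued group joins
theorem emit2 (gl : List (Int × String × List String)) (out : String) (p : Int)
    (hne : ∀ q ∈ gl, q.2.2 ≠ [])
    (hp : ∀ q ∈ gl, q.1 ≠ p)
    (hpw : gl.Pairwise (fun x y => x.1 ≠ y.1)) :
    (List.foldl pvStepB (out, p)
        (gl.flatMap (fun q => q.2.2.map (fun x => (q.1, q.2.1, x))))).1
      = out ++ pvGlue " and " (gl.map (fun q => PySem.Str.join q.2.1 q.2.2)) := by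
  induction gl generalizing out p with
  | nil => simp [pvGlue, str_append_empty]
  | cons q gl ih =>
      obtain ⟨g, sep, ts⟩ := q
      rcases ts with _ | ⟨a, t⟩
      · exact absurd rfl (hne _ (List.mem_cons_self))
      · rw [List.flatMap_cons, List.foldl_append, foldGroup g p (hp _ List.mem_cons_self) sep a t out]
        rw [ih _ g (fun q hq => hne q (List.mem_cons_of_mem _ hq))
              (fun q' hq => ((List.pairwise_cons.mp hpw).1 q' hq).symm)
              (List.pairwise_cons.mp hpw).2]
        simp [pvGlue, String.append_assoc]

-- main emission lemma: the flat single pass equals join-of-group-joins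
theorem strJoin_nil (sep : String) : PySem.Str.join sep [] = "" := by
  apply String.toList_inj.mp
  simp [PySem.Str.toList_join, PySem.Chars.join_nil]

theorem emit_eq (gl : List (Int × String × List String))
    (hne : ∀ q ∈ gl, q.2.2 ≠ [])
    (hpw : gl.Pairwise (fun x y => x.1 ≠ y.1)) :
    pvEmitB (gl.flatMap (fun q => q.2.2.map (fun x => (q.1, q.2.1, x))))
      = PySem.Str.join " and " (gl.map (fun q => PySem.Str.join q.2.1 q.2.2)) := by
  match gl with
  | [] => simp [pvEmitB, strJoin_nil]
  | q :: gl =>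
      obtain ⟨g, sep, ts⟩ := q
      rcases ts with _ | ⟨a, t⟩
      · exact absurd rfl (hne _ (List.mem_cons_self))
      · simp only [List.flatMap_cons, List.map_cons, List.cons_append, pvEmitB]
        rw [List.foldl_append, foldSame, emit2 gl _ g
              (fun q hq => hne q (List.mem_cons_of_mem _ hq))
              (fun q' hq => ((List.pairwise_cons.mp hpw).1 q' hq).symm)
              (List.pairwise_cons.mp hpw).2,
            join_eq_glue, join_eq_glue]

-- ===== VERDICT =====
theorem build_query_expression_py_spec : Claim_equal_build_query_expression_py := by
  intro fe mt pf b1 b2 b3 tr _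
  unfold Spec_build_query_expression_py build_query_expression_py build_query_expression_py_alt
  simp only [step_eq]
  simp only [PySem.List.enumerate_cons, PySem.List.enumerate_nil, List.foldl_cons, List.foldl_nil,
    List.nil_append, Int.reduceAdd]
  generalize fe.getD [] = l0
  generalize mt.getD [] = l1
  generalize pf.getD [] = l2
  rcases l0 with _ | ⟨a0, t0⟩ <;> rcases l1 with _ | ⟨a1, t1⟩ <;> rcases l2 with _ | ⟨a2, t2⟩
  case nil.nil.nil =>
    have h := emit_eq [((3:Int), " and ", [(if tr then "" else "not ") ++ "trashed"])]
      (by simp) (by simp)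
    simp only [List.flatMap_cons, List.flatMap_nil, List.map_cons, List.map_nil, List.map_map,
      Function.comp_def, List.append_nil, List.cons_append, List.nil_append, strJoin_singleton] at h
    simp only [List.isEmpty_cons, List.isEmpty_nil, if_true, if_false, Bool.false_eq_true,
      List.map_cons, List.map_nil, List.nil_append, List.cons_append, List.append_nil, strJoin_singleton]
    cases tr <;> simpa using h.symm
  case nil.nil.cons =>
    have h := emit_eq [((2:Int), (if b3 then " and " else " or "), (a2 :: t2).map (pvClauseB "name" b3 true)),
                       ((3:Int), " and ", [(if tr then "" else "not ") ++ "trashed"])]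
      (by simp) (by simp)
    simp only [List.flatMap_cons, List.flatMap_nil, List.map_cons, List.map_nil, List.map_map,
      Function.comp_def, List.append_nil, List.cons_append, List.nil_append, strJoin_singleton] at h
    simp only [List.isEmpty_cons, List.isEmpty_nil, if_true, if_false, Bool.false_eq_true,
      List.map_cons, List.map_nil, List.nil_append, List.cons_append, List.append_nil, strJoin_singleton]
    cases tr <;> simpa using h.symm
  case nil.cons.nil =>
    have h := emit_eq [((1:Int), (if b2 then " and " else " or "), (a1 :: t1).map (pvClauseB "mimeType" b2 false)),
                       ((3:Int), " and ", [(if tr then "" else "not ") ++ "trashed"])]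
      (by simp) (by simp)
    simp only [List.flatMap_cons, List.flatMap_nil, List.map_cons, List.map_nil, List.map_map,
      Function.comp_def, List.append_nil, List.cons_append, List.nil_append, strJoin_singleton] at h
    simp only [List.isEmpty_cons, List.isEmpty_nil, if_true, if_false, Bool.false_eq_true,
      List.map_cons, List.map_nil, List.nil_append, List.cons_append, List.append_nil, strJoin_singleton]
    cases tr <;> simpa using h.symm
  case nil.cons.cons =>
    have h := emit_eq [((1:Int), (if b2 then " and " else " or "), (a1 :: t1).map (pvClauseB "mimeType" b2 false)),
                       ((2:Int), (if b3 then " and " else " or "), (a2 :: t2).map (pvClauseB "name" b3 true)),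
                       ((3:Int), " and ", [(if tr then "" else "not ") ++ "trashed"])]
      (by simp) (by simp)
    simp only [List.flatMap_cons, List.flatMap_nil, List.map_cons, List.map_nil, List.map_map,
      Function.comp_def, List.append_nil, List.cons_append, List.nil_append, strJoin_singleton] at h
    simp only [List.isEmpty_cons, List.isEmpty_nil, if_true, if_false, Bool.false_eq_true,
      List.map_cons, List.map_nil, List.nil_append, List.cons_append, List.append_nil, strJoin_singleton]
    cases tr <;> simpa using h.symm
  case cons.nil.nil =>
    have h := emit_eq [((0:Int), (if b1 then " and " else " or "), (a0 :: t0).map (pvClauseB "fileExtension" b1 false)),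
                       ((3:Int), " and ", [(if tr then "" else "not ") ++ "trashed"])]
      (by simp) (by simp)
    simp only [List.flatMap_cons, List.flatMap_nil, List.map_cons, List.map_nil, List.map_map,
      Function.comp_def, List.append_nil, List.cons_append, List.nil_append, strJoin_singleton] at h
    simp only [List.isEmpty_cons, List.isEmpty_nil, if_true, if_false, Bool.false_eq_true,
      List.map_cons, List.map_nil, List.nil_append, List.cons_append, List.append_nil, strJoin_singleton]
    cases tr <;> simpa using h.symm
  case cons.nil.cons =>
    have h := emit_eq [((0:Int), (if b1 then " and " else " or "), (a0 :: t0).map (pvClauseB "fileExtension" b1 false)),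
                       ((2:Int), (if b3 then " and " else " or "), (a2 :: t2).map (pvClauseB "name" b3 true)),
                       ((3:Int), " and ", [(if tr then "" else "not ") ++ "trashed"])]
      (by simp) (by simp)
    simp only [List.flatMap_cons, List.flatMap_nil, List.map_cons, List.map_nil, List.map_map,
      Function.comp_def, List.append_nil, List.cons_append, List.nil_append, strJoin_singleton] at h
    simp only [List.isEmpty_cons, List.isEmpty_nil, if_true, if_false, Bool.false_eq_true,
      List.map_cons, List.map_nil, List.nil_append, List.cons_append, List.append_nil, strJoin_singleton]
    cases tr <;> simpa using h.symm
  case cons.cons.nil =>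
    have h := emit_eq [((0:Int), (if b1 then " and " else " or "), (a0 :: t0).map (pvClauseB "fileExtension" b1 false)),
                       ((1:Int), (if b2 then " and " else " or "), (a1 :: t1).map (pvClauseB "mimeType" b2 false)),
                       ((3:Int), " and ", [(if tr then "" else "not ") ++ "trashed"])]
      (by simp) (by simp)
    simp only [List.flatMap_cons, List.flatMap_nil, List.map_cons, List.map_nil, List.map_map,
      Function.comp_def, List.append_nil, List.cons_append, List.nil_append, strJoin_singleton] at h
    simp only [List.isEmpty_cons, List.isEmpty_nil, if_true, if_false, Bool.false_eq_true,
      List.map_cons, List.map_nil, List.nil_append, List.cons_append, List.append_nil, strJoin_singleton]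
    cases tr <;> simpa using h.symm
  case cons.cons.cons =>
    have h := emit_eq [((0:Int), (if b1 then " and " else " or "), (a0 :: t0).map (pvClauseB "fileExtension" b1 false)),
                       ((1:Int), (if b2 then " and " else " or "), (a1 :: t1).map (pvClauseB "mimeType" b2 false)),
                       ((2:Int), (if b3 then " and " else " or "), (a2 :: t2).map (pvClauseB "name" b3 true)),
                       ((3:Int), " and ", [(if tr then "" else "not ") ++ "trashed"])]
      (by simp) (by simp)
    simp only [List.flatMap_cons, List.flatMap_nil, List.map_cons, List.map_nil, List.map_map,
      Function.comp_def, List.append_nil, List.cons_append, List.nil_append, strJoin_singleton] at h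
    simp only [List.isEmpty_cons, List.isEmpty_nil, if_true, if_false, Bool.false_eq_true,
      List.map_cons, List.map_nil, List.nil_append, List.cons_append, List.append_nil, strJoin_singleton]
    cases tr <;> simpa using h.symm
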